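-- pv_equiv track=rewrite | github.com/Piousangel/PiousAngel_Algorithm | Programers/Level1/정수내림차순배치.py | solution
-- ===== SOURCE A (Python) =====
-- def solution(n):
--
--     answer = 0
--     temp = ''
--
--     strN = str(n)
--     n_list = list(map(int, strN.rstrip()))
--
--     n_list.sort(reverse = True)
--
--     for k in n_list :
--         temp += str(k)
--
--     answer = int(temp)
--     return answer
-- ===== SOURCE B (Python) =====
-- def solution(n):
--     digits = [int(c) for c in str(n)]
--     res = ''
--     for d in range(9, -1, -1):
--         res += str(d) * digits.count(d)
--     return int(res)
-- ===== Notes on version B (the rewrite author's own statement) =====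
-- stated objective: alternative
-- what changed: replaces the comparison sort + concatenation loop by a counting reconstruction: each digit value from highest to lowest is appended to the answer string repeated its number of occurrences, no sort at all
import Mathlib
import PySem

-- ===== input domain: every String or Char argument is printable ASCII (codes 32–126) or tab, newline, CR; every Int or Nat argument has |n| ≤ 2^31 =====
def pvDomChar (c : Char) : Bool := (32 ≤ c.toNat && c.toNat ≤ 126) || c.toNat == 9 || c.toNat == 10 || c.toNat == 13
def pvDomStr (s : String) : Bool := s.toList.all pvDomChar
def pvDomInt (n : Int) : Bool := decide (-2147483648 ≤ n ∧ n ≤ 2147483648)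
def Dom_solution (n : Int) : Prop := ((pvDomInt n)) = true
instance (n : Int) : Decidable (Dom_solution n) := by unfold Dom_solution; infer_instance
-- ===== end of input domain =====

-- B replaces A's comparison sort + concatenation loop by a counting reconstruction
-- (each digit value from highest to lowest, repeated its number of occurrences); equivalence of the
-- RETURN value (A sorts a local list in place, which no caller can observe).

-- ===== PORT A =====
def solution (n : Int) : Int :=
  let strN := PySem.Int.toChars n
  let n_list := (PySem.Chars.rstrip strN).map (fun c => (PySem.Int.ofChars? [c]).getD 0)
  let n_list := PySem.List.sorted n_list (fun x => x) true   -- n_list.sort(reverse=True)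
  let temp := n_list.foldl (fun acc k => acc ++ PySem.Int.toChars k) []
  (PySem.Int.ofChars? temp).getD 0   -- int(temp); Pre_ rules out the raising inputs

-- ===== PORT B =====
def solution_alt (n : Int) : Int :=
  let digits := (PySem.Int.toChars n).map (fun c => (PySem.Int.ofChars? [c]).getD 0)
  let res := (PySem.List.pyRange 9 (-1) (-1)).foldl
      (fun acc d => acc ++ (List.replicate (PySem.List.count digits d) (PySem.Int.toChars d)).flatten) []
  (PySem.Int.ofChars? res).getD 0

-- ===== PRECONDITION & SPEC =====
-- A (and B) raise ValueError for n < 0: int('-') fails when mapping int over the chars of str(n).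
def Pre_solution (n : Int) : Prop := 0 ≤ n
instance (n : Int) : Decidable (Pre_solution n) := by unfold Pre_solution; infer_instance
def pvWitness_solution : Int := (270)

def Spec_solution (n : Int) (out : Int) : Prop := out = solution_alt n
instance (n : Int) (out : Int) : Decidable (Spec_solution n out) := by unfold Spec_solution; infer_instance

-- ===== CLAIM (what is proved, stated in full; the proofs are below) =====
def Claim_equal_solution : Prop := ∀ (n : Int), Dom_solution n → Pre_solution n → Spec_solution n (solution n)

-- ===== LEMMAS AND PROOFS =====

def pvDigits : List Char := ['0','1','2','3','4','5','6','7','8','9']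

lemma digitChar_mem (k : Nat) (hk : k < 10) : Nat.digitChar k ∈ pvDigits := by
  interval_cases k <;> decide

lemma toDigitsCore_mem (fuel : Nat) : ∀ (m : Nat) (ds : List Char), (∀ c ∈ ds, c ∈ pvDigits) →
    ∀ c ∈ Nat.toDigitsCore 10 fuel m ds, c ∈ pvDigits := by
  induction fuel with
  | zero => intro m ds hds c hc; exact hds c hc
  | succ fuel ih =>
    intro m ds hds c hc
    simp only [Nat.toDigitsCore] at hc
    have hdig : ∀ c' ∈ (Nat.digitChar (m % 10)) :: ds, c' ∈ pvDigits := by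
      intro c' hc'
      rcases List.mem_cons.mp hc' with h | h
      · exact h ▸ digitChar_mem _ (Nat.mod_lt _ (by omega))
      · exact hds c' h
    by_cases h0 : m / 10 = 0
    · simp only [h0] at hc; exact hdig c hc
    · simp only [if_neg h0] at hc; exact ih (m / 10) _ hdig c hc

lemma toChars_mem (n : Int) (hn : 0 ≤ n) : ∀ c ∈ PySem.Int.toChars n, c ∈ pvDigits := by
  intro c hc
  simp only [PySem.Int.toChars, if_neg (by omega : ¬ n < 0)] at hc
  exact toDigitsCore_mem _ _ [] (by simp) c hc

lemma dropWhile_eq_self_of_none (p : Char → Bool) (l : List Char)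
    (h : ∀ x ∈ l, p x = false) : l.dropWhile p = l := by
  cases l with
  | nil => rfl
  | cons a l => simp [h a (List.mem_cons_self)]

lemma rstrip_digits (cs : List Char) (h : ∀ c ∈ cs, c ∈ pvDigits) :
    PySem.Chars.rstrip cs = cs := by
  simp only [PySem.Chars.rstrip]
  rw [dropWhile_eq_self_of_none, List.reverse_reverse]
  intro x hx
  have hx' : x ∈ pvDigits := h x (List.mem_reverse.mp hx)
  fin_cases hx' <;> decide

lemma digit_val_bounds (c : Char) (hc : c ∈ pvDigits) :
    0 ≤ (PySem.Int.ofChars? [c]).getD 0 ∧ (PySem.Int.ofChars? [c]).getD 0 ≤ 9 := by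
  fin_cases hc <;> decide

lemma pairwise_blocks (k : Int → Nat) (L : List Int) (hL : List.Pairwise (· > ·) L) :
    List.Pairwise (fun a b => b ≤ a) (L.flatMap (fun d => List.replicate (k d) d)) := by
  induction L with
  | nil => simp
  | cons d L ih =>
    simp only [List.flatMap_cons, List.pairwise_append]
    refine ⟨List.pairwise_replicate.mpr (Or.inr le_rfl), ih hL.tail, ?_⟩
    intro a ha b hb
    obtain ⟨-, rfl⟩ := List.mem_replicate.mp ha
    obtain ⟨d', hd', hb'⟩ := List.mem_flatMap.mp hb
    obtain rfl := (List.mem_replicate.mp hb').2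
    exact le_of_lt ((List.pairwise_cons.mp hL).1 b hd')

set_option maxHeartbeats 1000000 in
lemma perm_blocks (ds : List Int) (h : ∀ x ∈ ds, 0 ≤ x ∧ x ≤ 9) :
    ds.Perm (([9,8,7,6,5,4,3,2,1,0] : List Int).flatMap (fun d => List.replicate (List.count d ds) d)) := by
  rw [List.perm_iff_count]
  intro a
  simp only [List.flatMap_cons, List.flatMap_nil, List.count_append, List.count_replicate,
    List.append_nil, beq_iff_eq]
  by_cases hb : 0 ≤ a ∧ a ≤ 9
  · obtain ⟨h1, h2⟩ := hb
    interval_cases a <;> norm_num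
  · have hnm : a ∉ ds := fun hx => hb ⟨(h a hx).1, (h a hx).2⟩
    rw [List.count_eq_zero_of_not_mem hnm]
    rw [if_neg (by omega), if_neg (by omega), if_neg (by omega), if_neg (by omega), if_neg (by omega),
      if_neg (by omega), if_neg (by omega), if_neg (by omega), if_neg (by omega), if_neg (by omega)]

lemma countsort (ds : List Int) (h : ∀ x ∈ ds, 0 ≤ x ∧ x ≤ 9) :
    PySem.List.sorted ds (fun x => x) true
      = ([9,8,7,6,5,4,3,2,1,0] : List Int).flatMap (fun d => List.replicate (List.count d ds) d) := by
  refine List.eq_of_perm_of_sorted (le := fun a b : Int => b ≤ a)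
    (fun a b _ _ h1 h2 => le_antisymm h2 h1) ?_ ?_ ?_
  · exact PySem.List.sorted_pairwise_rev ds (fun x => x)
  · exact pairwise_blocks _ _ (by decide)
  · exact ((PySem.List.sorted_perm ds (fun x => x) true).trans (perm_blocks ds h))

lemma flatten_replicate_toChars (k : Nat) (d : Int) :
    (List.replicate k (PySem.Int.toChars d)).flatten
      = (List.replicate k d).flatMap PySem.Int.toChars := by
  induction k with
  | zero => rfl
  | succ k ih => simp [List.replicate_succ, ih]

theorem solution_eq_alt (n : Int) (hn : 0 ≤ n) : solution n = solution_alt n := by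
  have hmem := toChars_mem n hn
  simp only [solution, solution_alt]
  rw [rstrip_digits _ hmem]
  rw [PySem.List.foldl_append_eq_flatMap, PySem.List.foldl_append_eq_flatMap,
    show PySem.List.pyRange 9 (-1) (-1) = ([9,8,7,6,5,4,3,2,1,0] : List Int) from by decide]
  have hbound : ∀ x ∈ (PySem.Int.toChars n).map (fun c => (PySem.Int.ofChars? [c]).getD 0),
      0 ≤ x ∧ x ≤ 9 := by
    intro x hx
    obtain ⟨c, hc, rfl⟩ := List.mem_map.mp hx
    exact digit_val_bounds c (hmem c hc)
  rw [countsort _ hbound]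
  simp only [List.nil_append, List.flatMap_assoc, PySem.List.count, flatten_replicate_toChars]

-- ===== VERDICT (by name: the statement is the Claim_ definition above) =====
theorem solution_spec : Claim_equal_solution := by
  intro n _ hpre
  unfold Spec_solution
  exact solution_eq_alt n hpre
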